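-- pv_equiv track=rewrite | github.com/tkddls23/BaekJoon | yunu/프로그래머스/스타 수열/좋은 코드.py | solution
-- ===== SOURCE A (Python) =====
-- def solution(a):
--     dic = {}
--     check = {}
--     for i in range(len(a)):
--         dic[i] = 0
--         check[i] = -2
--
--     for i in range(len(a) - 1):
--         if a[i] != a[i+1]:
--             if check[a[i]] != i-1:
--                 dic[a[i]] += 1
--                 check[a[i]] = i
--             if check[a[i+1]] != i-1:
--                 dic[a[i+1]] += 1
--                 check[a[i+1]] = i
--
--     return max(dic.values()) * 2
-- ===== SOURCE B (Python) =====
-- def solution(a):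
--     positions = {i: [] for i in range(len(a))}
--     for i in range(len(a) - 1):
--         if a[i] != a[i+1]:
--             positions[a[i]].append(i)
--             positions[a[i+1]].append(i)
--     best = []
--     for idxs in positions.values():
--         cnt = 0
--         last = -2
--         for i in idxs:
--             if last != i - 1:
--                 cnt += 1
--                 last = i
--         best.append(cnt)
--     return max(best) * 2
-- ===== Notes on version B (the rewrite author's own statement) =====
-- stated objective: alternative
-- what changed: A maintains two index-keyed dicts (running count and last-counted pair index per value) updated interleaved in a single pass and returns max count * 2; B first populates an index-keyed dict of per-value lists of unequal-pair indices in one pass, then in a second pass greedily counts each value's list (skipping an index adjacent to the last counted one) and takes the max.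
import Mathlib
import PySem

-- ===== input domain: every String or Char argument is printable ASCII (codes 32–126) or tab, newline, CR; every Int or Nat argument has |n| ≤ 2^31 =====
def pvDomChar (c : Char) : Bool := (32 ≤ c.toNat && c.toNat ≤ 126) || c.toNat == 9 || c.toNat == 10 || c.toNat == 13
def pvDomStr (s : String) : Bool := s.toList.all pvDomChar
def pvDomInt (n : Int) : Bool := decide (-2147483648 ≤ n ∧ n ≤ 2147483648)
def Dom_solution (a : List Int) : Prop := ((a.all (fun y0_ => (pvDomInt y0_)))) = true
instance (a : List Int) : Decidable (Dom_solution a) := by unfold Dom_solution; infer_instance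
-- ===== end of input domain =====

-- B replaces A's interleaved two-dict (count, last-index) bookkeeping by a populate-then-process
-- decomposition: one pass groups the unequal-pair indices per value, a second pass greedily
-- counts each value's list and takes the max; objective: alternative (same cost, different structure).

-- ===== PORT A =====
-- dict lookups dic[k]/check[k] are ported with getD and max() with (max? …).getD 0: on inputs
-- where Python would raise KeyError/ValueError the input is outside Pre_solution, so this is exact on Pre_.
def aStep (a : List Int) (st : PySem.Dict Int Int × PySem.Dict Int Int) (i : Int) :
    PySem.Dict Int Int × PySem.Dict Int Int :=
  let ai := PySem.List.pyGetD a i 0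
  let aj := PySem.List.pyGetD a (i + 1) 0
  if ai ≠ aj then
    let st1 := if st.2.getD ai (-2) ≠ i - 1
               then (st.1.insert ai (st.1.getD ai 0 + 1), st.2.insert ai i) else st
    if st1.2.getD aj (-2) ≠ i - 1
               then (st1.1.insert aj (st1.1.getD aj 0 + 1), st1.2.insert aj i) else st1
  else st

def solution (a : List Int) : Int :=
  let init := (PySem.List.pyRange 0 (a.length : Int) 1).foldl
      (fun (st : PySem.Dict Int Int × PySem.Dict Int Int) i => (st.1.insert i 0, st.2.insert i (-2)))
      (PySem.Dict.empty, PySem.Dict.empty)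
  let st := (PySem.List.pyRange 0 ((a.length : Int) - 1) 1).foldl (aStep a) init
  ((PySem.List.max? st.1.values (fun x => x)).getD 0) * 2

-- ===== PORT B =====
-- positions[k].append(i)  ==  d.modify k [] (· ++ [i])  (exact on Pre_: the key is present;
-- where Python would raise KeyError/ValueError the input is outside Pre_solution)
def bStep (a : List Int) (d : PySem.Dict Int (List Int)) (i : Int) : PySem.Dict Int (List Int) :=
  let ai := PySem.List.pyGetD a i 0
  let aj := PySem.List.pyGetD a (i + 1) 0
  if ai ≠ aj then (d.modify ai [] (· ++ [i])).modify aj [] (· ++ [i]) else d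

def bCount (idxs : List Int) : Int × Int :=
  idxs.foldl (fun cl i => if cl.2 ≠ i - 1 then (cl.1 + 1, i) else cl) ((0 : Int), (-2 : Int))

def solution_alt (a : List Int) : Int :=
  let init := (PySem.List.pyRange 0 (a.length : Int) 1).foldl
      (fun (d : PySem.Dict Int (List Int)) i => d.insert i []) PySem.Dict.empty
  let positions := (PySem.List.pyRange 0 ((a.length : Int) - 1) 1).foldl (bStep a) init
  let best := positions.values.foldl (fun acc idxs => acc ++ [(bCount idxs).1]) []
  (PySem.List.max? best (fun x => x)).getD 0 * 2

-- ===== PRECONDITION & SPEC =====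
-- Pre_ excludes exactly the inputs on which A raises: the empty list (ValueError from max of an
-- empty dict) and lists where some adjacent unequal pair has a value outside 0..len(a)-1
-- (KeyError: A's dicts are keyed by the indices 0..len(a)-1).
def Pre_solution (a : List Int) : Prop :=
  a ≠ [] ∧ ∀ i ∈ PySem.List.pyRange 0 ((a.length : Int) - 1) 1,
    PySem.List.pyGetD a i 0 ≠ PySem.List.pyGetD a (i + 1) 0 →
    (0 ≤ PySem.List.pyGetD a i 0 ∧ PySem.List.pyGetD a i 0 < (a.length : Int) ∧
     0 ≤ PySem.List.pyGetD a (i + 1) 0 ∧ PySem.List.pyGetD a (i + 1) 0 < (a.length : Int))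
instance (a : List Int) : Decidable (Pre_solution a) := by unfold Pre_solution; infer_instance

def pvWitness_solution : List Int := [0, 1, 0, 1, 3, 3]

def Spec_solution (a : List Int) (out : Int) : Prop := out = solution_alt a
instance (a : List Int) (out : Int) : Decidable (Spec_solution a out) := by unfold Spec_solution; infer_instance

-- ===== CLAIM (what is proved, stated in full; the proofs are below) =====
def Claim_equal_solution : Prop := ∀ (a : List Int), Dom_solution a → Pre_solution a → Spec_solution a (solution a)

-- ===== LEMMAS AND PROOFS =====

-- the shared abstractions: which pair indices concern value v, and the greedy counter
def pairPred (a : List Int) (v : Int) (i : Int) : Bool :=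
  (PySem.List.pyGetD a i 0 != PySem.List.pyGetD a (i + 1) 0) &&
  (PySem.List.pyGetD a i 0 == v || PySem.List.pyGetD a (i + 1) 0 == v)

def cnt (a : List Int) (v : Int) : Int :=
  (bCount ((PySem.List.pyRange 0 ((a.length : Int) - 1) 1).filter (pairPred a v))).1

lemma aInit_split (I : List Int) (d1 d2 : PySem.Dict Int Int) :
    I.foldl (fun (st : PySem.Dict Int Int × PySem.Dict Int Int) i =>
        (st.1.insert i 0, st.2.insert i (-2))) (d1, d2) =
    (I.foldl (fun d i => d.insert i 0) d1, I.foldl (fun d i => d.insert i (-2)) d2) := by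
  induction I generalizing d1 d2 with
  | nil => rfl
  | cons i t ih => simp only [List.foldl_cons]; exact ih _ _

lemma const_insert_getD {ν : Type} (I : List Int) (c : ν) (d : PySem.Dict Int ν)
    (hd : ∀ w, d.getD w c = c) (v : Int) :
    (I.foldl (fun d i => d.insert i c) d).getD v c = c := by
  induction I generalizing d with
  | nil => exact hd v
  | cons i t ih =>
    simp only [List.foldl_cons]
    refine ih _ (fun w => ?_)
    rw [PySem.Dict.getD_insert]
    split <;> [rfl; exact hd w]

lemma aStep_getD (a : List Int) (dic chk : PySem.Dict Int Int) (i v : Int) :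
    ((aStep a (dic, chk) i).1.getD v 0, (aStep a (dic, chk) i).2.getD v (-2)) =
    (if pairPred a v i then
       (if chk.getD v (-2) ≠ i - 1 then (dic.getD v 0 + 1, i) else (dic.getD v 0, chk.getD v (-2)))
     else (dic.getD v 0, chk.getD v (-2))) := by
  unfold aStep pairPred
  generalize PySem.List.pyGetD a i 0 = x
  generalize PySem.List.pyGetD a (i + 1) 0 = y
  by_cases hxy : x = y
  · simp [hxy]
  · by_cases hx : x = v <;> by_cases hy : y = v
    · exact absurd (hx.trans hy.symm) hxy
    · -- x = v, y ≠ v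
      subst hx
      simp only [ne_eq, hxy, not_false_eq_true, if_true, ite_true, bne_iff_ne, beq_iff_eq, hy,
        beq_self_eq_true, Bool.true_or, Bool.and_true, decide_true, if_false, ite_false,
        Bool.true_and, Bool.or_false, Bool.and_self]
      split_ifs <;> simp_all [PySem.Dict.getD_insert]
    · -- y = v, x ≠ v
      subst hy
      have hyx : ¬ y = x := fun h => hxy h.symm
      simp only [ne_eq, hxy, not_false_eq_true, if_true, ite_true, bne_iff_ne, beq_iff_eq, hx,
        beq_self_eq_true, Bool.or_true, Bool.and_true, decide_true, if_false, ite_false,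
        Bool.true_and, Bool.false_or, Bool.and_self]
      split_ifs <;> simp_all [PySem.Dict.getD_insert, hyx]
    · -- neither
      have hvx : ¬ v = x := fun h => hx h.symm
      have hvy : ¬ v = y := fun h => hy h.symm
      simp only [ne_eq, hxy, not_false_eq_true, if_true, ite_true, bne_iff_ne, beq_iff_eq, hx, hy,
        decide_true, if_false, ite_false, Bool.true_and, Bool.or_self, Bool.and_false,
        Bool.false_or, Bool.or_false]
      split_ifs <;> simp_all [PySem.Dict.getD_insert, hvx, hvy]

lemma aFold_getD (a : List Int) (I : List Int) (dic chk : PySem.Dict Int Int) (v : Int) :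
    (((I.foldl (aStep a) (dic, chk)).1.getD v 0, (I.foldl (aStep a) (dic, chk)).2.getD v (-2))) =
    (I.filter (pairPred a v)).foldl (fun cl i => if cl.2 ≠ i - 1 then (cl.1 + 1, i) else cl)
      (dic.getD v 0, chk.getD v (-2)) := by
  induction I generalizing dic chk with
  | nil => simp
  | cons i t ih =>
    simp only [List.foldl_cons, List.filter_cons]
    have ih' := ih (aStep a (dic, chk) i).1 (aStep a (dic, chk) i).2
    rw [Prod.mk.eta] at ih'
    rw [ih', aStep_getD a dic chk i v]
    rcases hpp : pairPred a v i
    · simp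
    · simp

lemma aStep_keys (a : List Int) (st : PySem.Dict Int Int × PySem.Dict Int Int) (i : Int)
    (h : PySem.List.pyGetD a i 0 ≠ PySem.List.pyGetD a (i + 1) 0 →
      PySem.List.pyGetD a i 0 ∈ st.1.keys ∧ PySem.List.pyGetD a (i + 1) 0 ∈ st.1.keys) :
    (aStep a st i).1.keys = st.1.keys := by
  unfold aStep
  by_cases hne : PySem.List.pyGetD a i 0 = PySem.List.pyGetD a (i + 1) 0
  · simp [hne]
  · obtain ⟨h1, h2⟩ := h hne
    simp only [ne_eq, hne, not_false_eq_true, if_true, ite_true]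
    have c1 : st.1.contains (PySem.List.pyGetD a i 0) = true :=
      (PySem.Dict.contains_iff_mem_keys _ _).mpr h1
    have c2 : st.1.contains (PySem.List.pyGetD a (i + 1) 0) = true :=
      (PySem.Dict.contains_iff_mem_keys _ _).mpr h2
    split_ifs <;>
      simp_all [PySem.Dict.keys_insert_of_contains, PySem.Dict.contains_insert,
        PySem.Dict.contains_iff_mem_keys]

lemma aFold_keys (a : List Int) (I : List Int) (st : PySem.Dict Int Int × PySem.Dict Int Int)
    (h : ∀ i ∈ I, PySem.List.pyGetD a i 0 ≠ PySem.List.pyGetD a (i + 1) 0 →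
        PySem.List.pyGetD a i 0 ∈ st.1.keys ∧ PySem.List.pyGetD a (i + 1) 0 ∈ st.1.keys) :
    (I.foldl (aStep a) st).1.keys = st.1.keys := by
  induction I generalizing st with
  | nil => rfl
  | cons i t ih =>
    have hk := aStep_keys a st i (h i (List.mem_cons_self))
    rw [List.foldl_cons, ih (aStep a st i) (fun j hj => by rw [hk]; exact h j (List.mem_cons_of_mem _ hj)), hk]

lemma bStep_getD (a : List Int) (d : PySem.Dict Int (List Int)) (i v : Int) :
    (bStep a d i).getD v [] = if pairPred a v i then d.getD v [] ++ [i] else d.getD v [] := by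
  unfold bStep pairPred
  generalize PySem.List.pyGetD a i 0 = x
  generalize PySem.List.pyGetD a (i + 1) 0 = y
  by_cases hxy : x = y
  · simp [hxy]
  · simp only [ne_eq, hxy, not_false_eq_true, if_true, ite_true,
      PySem.Dict.getD_modify, bne_iff_ne, beq_iff_eq]
    by_cases h1 : v = y <;> by_cases h2 : v = x <;>
      simp_all [PySem.Dict.getD_modify] <;>
      exact ⟨fun h => h2 h.symm, fun h => h1 h.symm⟩

lemma bFold_getD (a : List Int) (I : List Int) (d : PySem.Dict Int (List Int)) (v : Int) :
    (I.foldl (bStep a) d).getD v [] = d.getD v [] ++ I.filter (pairPred a v) := by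
  induction I generalizing d with
  | nil => simp
  | cons i t ih =>
    simp only [List.foldl_cons, List.filter_cons]
    rw [ih, bStep_getD]
    rcases hpp : pairPred a v i <;> simp

lemma A_val (a : List Int)
    (hbound : ∀ i ∈ PySem.List.pyRange 0 ((a.length : Int) - 1) 1,
      PySem.List.pyGetD a i 0 ≠ PySem.List.pyGetD a (i + 1) 0 →
      (0 ≤ PySem.List.pyGetD a i 0 ∧ PySem.List.pyGetD a i 0 < (a.length : Int) ∧
       0 ≤ PySem.List.pyGetD a (i + 1) 0 ∧ PySem.List.pyGetD a (i + 1) 0 < (a.length : Int))) :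
    solution a = (PySem.List.max? ((PySem.List.pyRange 0 (a.length : Int) 1).map (cnt a))
      (fun x => x)).getD 0 * 2 := by
  simp only [solution]
  rw [aInit_split]
  have hkeysD0 : ((PySem.List.pyRange 0 (a.length : Int) 1).foldl
      (fun d i => d.insert i 0) (PySem.Dict.empty : PySem.Dict Int Int)).keys
      = PySem.List.pyRange 0 (a.length : Int) 1 := by
    have h := PySem.Dict.keys_foldl_insert (PySem.List.pyRange 0 (a.length : Int) 1)
      (fun _ _ => (0 : Int)) PySem.Dict.empty
    simpa [PySem.Dict.keys_empty, PySem.Set.update_nil_left,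
      PySem.Set.ofList_eq_self_of_nodup _ (PySem.List.nodup_pyRange_one _ _)] using h
  have hstkeys : ((PySem.List.pyRange 0 ((a.length : Int) - 1) 1).foldl (aStep a)
      (((PySem.List.pyRange 0 (a.length : Int) 1).foldl (fun d i => d.insert i 0) PySem.Dict.empty),
       ((PySem.List.pyRange 0 (a.length : Int) 1).foldl (fun d i => d.insert i (-2)) PySem.Dict.empty))).1.keys
      = PySem.List.pyRange 0 (a.length : Int) 1 := by
    rw [aFold_keys]
    · exact hkeysD0
    · intro i hi hne
      obtain ⟨h1, h2, h3, h4⟩ := hbound i hi hne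
      rw [hkeysD0]
      exact ⟨PySem.List.mem_pyRange_one.mpr ⟨h1, h2⟩, PySem.List.mem_pyRange_one.mpr ⟨h3, h4⟩⟩
  have hnodup := hstkeys ▸ PySem.List.nodup_pyRange_one (0 : Int) (a.length : Int)
  rw [PySem.Dict.values_eq_map_keys _ hnodup 0, hstkeys]
  have hmapeq : (PySem.List.pyRange 0 (a.length : Int) 1).map
      (fun k => ((PySem.List.pyRange 0 ((a.length : Int) - 1) 1).foldl (aStep a)
      (((PySem.List.pyRange 0 (a.length : Int) 1).foldl (fun d i => d.insert i 0) PySem.Dict.empty),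
       ((PySem.List.pyRange 0 (a.length : Int) 1).foldl (fun d i => d.insert i (-2)) PySem.Dict.empty))).1.getD k 0)
      = (PySem.List.pyRange 0 (a.length : Int) 1).map (cnt a) := by
    refine List.map_congr_left (fun v _ => ?_)
    have h := congrArg Prod.fst (aFold_getD a (PySem.List.pyRange 0 ((a.length : Int) - 1) 1)
      ((PySem.List.pyRange 0 (a.length : Int) 1).foldl (fun d i => d.insert i 0) PySem.Dict.empty)
      ((PySem.List.pyRange 0 (a.length : Int) 1).foldl (fun d i => d.insert i (-2)) PySem.Dict.empty) v)
    simp only at h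
    rw [h, const_insert_getD _ 0 _ (fun w => PySem.Dict.getD_empty _ _),
      const_insert_getD _ (-2) _ (fun w => PySem.Dict.getD_empty _ _)]
    rfl
  rw [hmapeq]

lemma bStep_keys (a : List Int) (d : PySem.Dict Int (List Int)) (i : Int)
    (h : PySem.List.pyGetD a i 0 ≠ PySem.List.pyGetD a (i + 1) 0 →
      PySem.List.pyGetD a i 0 ∈ d.keys ∧ PySem.List.pyGetD a (i + 1) 0 ∈ d.keys) :
    (bStep a d i).keys = d.keys := by
  unfold bStep
  by_cases hne : PySem.List.pyGetD a i 0 = PySem.List.pyGetD a (i + 1) 0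
  · simp [hne]
  · obtain ⟨h1, h2⟩ := h hne
    have c1 : d.contains (PySem.List.pyGetD a i 0) = true :=
      (PySem.Dict.contains_iff_mem_keys _ _).mpr h1
    have c2 : (d.modify (PySem.List.pyGetD a i 0) [] (· ++ [i])).contains
        (PySem.List.pyGetD a (i + 1) 0) = true := by
      rw [PySem.Dict.contains_modify]
      simp [(PySem.Dict.contains_iff_mem_keys _ _).mpr h2]
    simp only [ne_eq, hne, not_false_eq_true, if_true, ite_true]
    rw [PySem.Dict.keys_modify, PySem.Dict.keys_insert_of_contains _ _ c2,
      PySem.Dict.keys_modify, PySem.Dict.keys_insert_of_contains _ _ c1]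

lemma bFold_keys (a : List Int) (I : List Int) (d : PySem.Dict Int (List Int))
    (h : ∀ i ∈ I, PySem.List.pyGetD a i 0 ≠ PySem.List.pyGetD a (i + 1) 0 →
        PySem.List.pyGetD a i 0 ∈ d.keys ∧ PySem.List.pyGetD a (i + 1) 0 ∈ d.keys) :
    (I.foldl (bStep a) d).keys = d.keys := by
  induction I generalizing d with
  | nil => rfl
  | cons i t ih =>
    have hk := bStep_keys a d i (h i List.mem_cons_self)
    rw [List.foldl_cons, ih (bStep a d i)
      (fun j hj => by rw [hk]; exact h j (List.mem_cons_of_mem _ hj)), hk]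

lemma B_val (a : List Int)
    (hbound : ∀ i ∈ PySem.List.pyRange 0 ((a.length : Int) - 1) 1,
      PySem.List.pyGetD a i 0 ≠ PySem.List.pyGetD a (i + 1) 0 →
      (0 ≤ PySem.List.pyGetD a i 0 ∧ PySem.List.pyGetD a i 0 < (a.length : Int) ∧
       0 ≤ PySem.List.pyGetD a (i + 1) 0 ∧ PySem.List.pyGetD a (i + 1) 0 < (a.length : Int))) :
    solution_alt a = (PySem.List.max? ((PySem.List.pyRange 0 (a.length : Int) 1).map (cnt a))
      (fun x => x)).getD 0 * 2 := by
  simp only [solution_alt]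
  have hkeys0 : ((PySem.List.pyRange 0 (a.length : Int) 1).foldl
      (fun (d : PySem.Dict Int (List Int)) i => d.insert i []) PySem.Dict.empty).keys
      = PySem.List.pyRange 0 (a.length : Int) 1 := by
    have h := PySem.Dict.keys_foldl_insert (PySem.List.pyRange 0 (a.length : Int) 1)
      (fun _ _ => ([] : List Int)) PySem.Dict.empty
    simpa [PySem.Dict.keys_empty, PySem.Set.update_nil_left,
      PySem.Set.ofList_eq_self_of_nodup _ (PySem.List.nodup_pyRange_one _ _)] using h
  have hkeys : ((PySem.List.pyRange 0 ((a.length : Int) - 1) 1).foldl (bStep a)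
      ((PySem.List.pyRange 0 (a.length : Int) 1).foldl
        (fun (d : PySem.Dict Int (List Int)) i => d.insert i []) PySem.Dict.empty)).keys
      = PySem.List.pyRange 0 (a.length : Int) 1 := by
    rw [bFold_keys]
    · exact hkeys0
    · intro i hi hne
      obtain ⟨h1, h2, h3, h4⟩ := hbound i hi hne
      rw [hkeys0]
      exact ⟨PySem.List.mem_pyRange_one.mpr ⟨h1, h2⟩, PySem.List.mem_pyRange_one.mpr ⟨h3, h4⟩⟩
  have hnodup := hkeys ▸ PySem.List.nodup_pyRange_one (0 : Int) (a.length : Int)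
  rw [PySem.List.foldl_append_singleton_eq_map,
    PySem.Dict.values_eq_map_keys _ hnodup ([] : List Int), hkeys, List.map_map]
  have hmapeq : (PySem.List.pyRange 0 (a.length : Int) 1).map
      ((fun idxs => (bCount idxs).1) ∘ (fun k =>
        ((PySem.List.pyRange 0 ((a.length : Int) - 1) 1).foldl (bStep a)
          ((PySem.List.pyRange 0 (a.length : Int) 1).foldl
            (fun (d : PySem.Dict Int (List Int)) i => d.insert i []) PySem.Dict.empty)).getD k []))
      = (PySem.List.pyRange 0 (a.length : Int) 1).map (cnt a) := by
    refine List.map_congr_left (fun v _ => ?_)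
    simp only [Function.comp]
    rw [bFold_getD, const_insert_getD _ ([] : List Int) _ (fun w => PySem.Dict.getD_empty _ _)]
    rfl
  rw [hmapeq, List.nil_append]

-- ===== VERDICT (by name: the statement is the Claim_ definition above) =====
theorem solution_spec : Claim_equal_solution := by
  intro a _ hpre
  unfold Pre_solution at hpre
  unfold Spec_solution
  rw [A_val a hpre.2, B_val a hpre.2]
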